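-- pv_equiv track=rewrite | github.com/JEFFTIMES/pyprac | data-structure-and-algorithm/tree-and-graph/max_value_trace_of_matrix.py | traverse
-- ===== SOURCE A (Python) =====
-- def shape(matrix):
--   return len(matrix), len(matrix[0])
--
-- def get_left_node(node, matrix):
--   rows, cols = shape(matrix)
--   if node[0] < rows-1:
--     return (node[0]+1, node[1])
--   else:
--     return None
--
-- def get_right_node(node,matrix):
--   rows, cols = shape(matrix)
--   if node[1] < cols-1:
--     return node[0], node[1]+1
--
-- def traverse(node, matrix):
--   row, col = node
--   yield matrix[row][col]
--   l_node = get_left_node(node, matrix)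
--   r_node = get_right_node(node, matrix)
--   if not l_node is None:
--     for value in traverse(l_node, matrix):
--       yield value
--   if not r_node is None:
--     for value in traverse(r_node, matrix):
--       yield value
-- ===== SOURCE B (Python) =====
-- def traverse(node, matrix):
--     rows, cols = len(matrix), len(matrix[0])
--     stack = [node]
--     while stack:
--         row, col = stack.pop()
--         yield matrix[row][col]
--         if col < cols - 1:
--             stack.append((row, col + 1))
--         if row < rows - 1:
--             stack.append((row + 1, col))
-- ===== Notes on version B (the rewrite author's own statement) =====
-- stated objective: alternative
-- what changed: Recursive generator delegation (each node recursively yields its down then right subtree through nested generators) is replaced by an iterative generator over an explicit stack that pushes the right child before the down child.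
import Mathlib
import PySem

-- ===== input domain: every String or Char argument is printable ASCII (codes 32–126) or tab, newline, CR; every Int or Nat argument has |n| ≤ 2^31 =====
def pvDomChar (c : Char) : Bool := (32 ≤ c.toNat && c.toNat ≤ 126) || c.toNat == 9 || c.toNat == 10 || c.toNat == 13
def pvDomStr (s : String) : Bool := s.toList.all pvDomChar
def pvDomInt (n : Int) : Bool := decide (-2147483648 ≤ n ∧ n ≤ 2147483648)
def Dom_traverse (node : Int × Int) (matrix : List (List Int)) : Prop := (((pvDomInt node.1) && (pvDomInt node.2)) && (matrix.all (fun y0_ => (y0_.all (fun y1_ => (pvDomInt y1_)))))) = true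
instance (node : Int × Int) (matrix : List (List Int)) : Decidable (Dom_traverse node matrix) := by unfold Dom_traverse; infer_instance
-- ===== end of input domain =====

-- B replaces A's recursive generator delegation by an iterative generator over an explicit
-- stack (push right child, then down child), yielding the same pre-order sequence; the
-- equivalence proved is about the list of yielded values.

-- ===== PORT A =====
-- shape(matrix): len(matrix[0]) raises IndexError on an empty matrix; that input is
-- excluded by Pre_traverse, here modeled with the default [].
def pvShape (matrix : List (List Int)) : Int × Int :=
  ((matrix.length : Int), (((PySem.List.pyGet? matrix 0).getD []).length : Int))

def pvGetLeftNode (node : Int × Int) (matrix : List (List Int)) : Option (Int × Int) :=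
  if node.1 < (pvShape matrix).1 - 1 then some (node.1 + 1, node.2) else none

def pvGetRightNode (node : Int × Int) (matrix : List (List Int)) : Option (Int × Int) :=
  if node.2 < (pvShape matrix).2 - 1 then some (node.1, node.2 + 1) else none

-- depth measure of the recursion: both children strictly decrease it
def pvDepth (matrix : List (List Int)) (node : Int × Int) : Nat :=
  ((pvShape matrix).1 - 1 - node.1).toNat + ((pvShape matrix).2 - 1 - node.2).toNat

-- A's recursion, with a fuel argument as a pure totality guard (fuel > pvDepth always
-- suffices, see pvTravGo_fuel below; traverse passes pvDepth + 1).
-- matrix[row][col] raises outside Pre_traverse; modeled with default 0 there.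
def pvTravGo (matrix : List (List Int)) : Nat → Int × Int → List Int
  | 0, _ => []
  | fuel + 1, node =>
    let v := (PySem.List.pyGet? ((PySem.List.pyGet? matrix node.1).getD []) node.2).getD 0
    v :: ((match pvGetLeftNode node matrix with
            | some ln => pvTravGo matrix fuel ln
            | none => ([] : List Int)) ++
          (match pvGetRightNode node matrix with
            | some rn => pvTravGo matrix fuel rn
            | none => ([] : List Int)))

def traverse (node : Int × Int) (matrix : List (List Int)) : List Int :=
  pvTravGo matrix (pvDepth matrix node + 1) node

-- ===== PORT B =====
-- Python's list-as-stack (append / pop at the right end) is modeled with the HEAD of the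
-- Lean list as the top of the stack; pushing right then down therefore conses down first.
-- 3 ^ pvDepth bounds the number of loop iterations (pops) and serves as fuel, a pure
-- totality guard: the summed weight of the stack strictly decreases at each pop.
def pvAltWeight (rows cols : Int) (p : Int × Int) : Nat :=
  3 ^ ((rows - 1 - p.1).toNat + (cols - 1 - p.2).toNat)

def pvAltLoop (matrix : List (List Int)) (rows cols : Int) : Nat → List (Int × Int) → List Int
  | _, [] => []
  | 0, _ :: _ => []
  | fuel + 1, (r, c) :: rest =>
    let v := (PySem.List.pyGet? ((PySem.List.pyGet? matrix r).getD []) c).getD 0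
    v :: pvAltLoop matrix rows cols fuel
      ((if r < rows - 1 then [(r + 1, c)] else []) ++
       (if c < cols - 1 then [(r, c + 1)] else []) ++ rest)

def traverse_alt (node : Int × Int) (matrix : List (List Int)) : List Int :=
  let rows := (matrix.length : Int)
  let cols := (((PySem.List.pyGet? matrix 0).getD []).length : Int)
  pvAltLoop matrix rows cols (pvAltWeight rows cols node) [node]

-- ===== PRECONDITION & SPEC =====
-- Pre_traverse: exactly the inputs on which Python A returns (every cell the down/right
-- traversal touches is a valid (possibly negative) Python index of its row).
def Pre_traverse (node : Int × Int) (matrix : List (List Int)) : Prop :=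
  matrix ≠ [] ∧
  -(matrix.length : Int) ≤ node.1 ∧ node.1 < (matrix.length : Int) ∧
  ∀ i : Nat, i < matrix.length → node.1 ≤ (i : Int) →
    -(((matrix.getD i []).length : Int)) ≤ node.2 ∧
    max node.2 (((matrix.headD []).length : Int) - 1) < ((matrix.getD i []).length : Int)

instance (node : Int × Int) (matrix : List (List Int)) : Decidable (Pre_traverse node matrix) := by
  unfold Pre_traverse; infer_instance

def pvWitness_traverse : (Int × Int) × List (List Int) := ((0, 0), [[1, 2], [3, 4]])

def Spec_traverse (node : Int × Int) (matrix : List (List Int)) (out : List Int) : Prop := out = traverse_alt node matrix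
instance (node : Int × Int) (matrix : List (List Int)) (out : List Int) : Decidable (Spec_traverse node matrix out) := by unfold Spec_traverse; infer_instance

-- ===== CLAIM (what is proved, stated in full; the proofs are below) =====
def Claim_equal_traverse : Prop := ∀ (node : Int × Int) (matrix : List (List Int)), Dom_traverse node matrix → Pre_traverse node matrix → Spec_traverse node matrix (traverse node matrix)

-- ===== LEMMAS AND PROOFS =====

-- A's recursion does not depend on the fuel once the fuel exceeds the depth measure
lemma pvTravGo_fuel (matrix : List (List Int)) :
    ∀ f1 : Nat, ∀ f2 : Nat, ∀ node : Int × Int,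
      pvDepth matrix node < f1 → pvDepth matrix node < f2 →
      pvTravGo matrix f1 node = pvTravGo matrix f2 node := by
  intro f1
  induction f1 with
  | zero => intro f2 node h1 _; omega
  | succ f1 ih =>
    intro f2 node h1 h2
    obtain ⟨g2, rfl⟩ : ∃ g2, f2 = g2 + 1 := ⟨f2 - 1, by omega⟩
    rw [pvTravGo, pvTravGo]
    have hleft : (match pvGetLeftNode node matrix with
        | some ln => pvTravGo matrix f1 ln
        | none => ([] : List Int)) =
        (match pvGetLeftNode node matrix with
        | some ln => pvTravGo matrix g2 ln
        | none => ([] : List Int)) := by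
      unfold pvGetLeftNode
      split_ifs with hd
      · simp only
        exact ih g2 _ (by simp [pvDepth] at *; omega) (by simp [pvDepth] at *; omega)
      · rfl
    have hright : (match pvGetRightNode node matrix with
        | some rn => pvTravGo matrix f1 rn
        | none => ([] : List Int)) =
        (match pvGetRightNode node matrix with
        | some rn => pvTravGo matrix g2 rn
        | none => ([] : List Int)) := by
      unfold pvGetRightNode
      split_ifs with hc
      · simp only
        exact ih g2 _ (by simp [pvDepth] at *; omega) (by simp [pvDepth] at *; omega)
      · rfl
    rw [hleft, hright]

-- the summed stack weight strictly decreases at each pop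
lemma pvAltWeight_lt (rows cols r c : Int) (rest : List (Int × Int)) :
    (((if r < rows - 1 then [(r + 1, c)] else []) ++
      (if c < cols - 1 then [(r, c + 1)] else []) ++ rest).map (pvAltWeight rows cols)).sum
      < ((((r, c) : Int × Int) :: rest).map (pvAltWeight rows cols)).sum := by
  have h3 : ∀ k : Nat, 1 ≤ k → 3 ^ (k - 1) + 3 ^ (k - 1) < 3 ^ k := by
    intro k hk
    obtain ⟨j, rfl⟩ : ∃ j, k = j + 1 := ⟨k - 1, by omega⟩
    have hj : 1 ≤ 3 ^ j := Nat.one_le_pow _ _ (by omega)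
    have hs : (3 : Nat) ^ (j + 1) = 3 ^ j * 3 := pow_succ 3 j
    simp only [Nat.add_sub_cancel]
    omega
  simp only [List.map_append, List.sum_append, List.map_cons, List.sum_cons]
  split_ifs with h1 h2 h2
  all_goals simp only [List.map_cons, List.map_nil, List.sum_cons, List.sum_nil, pvAltWeight]
  · rw [show (rows - 1 - (r + 1)).toNat + (cols - 1 - c).toNat
        = ((rows - 1 - r).toNat + (cols - 1 - c).toNat) - 1 from by omega,
        show (rows - 1 - r).toNat + (cols - 1 - (c + 1)).toNat
        = ((rows - 1 - r).toNat + (cols - 1 - c).toNat) - 1 from by omega]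
    have := h3 ((rows - 1 - r).toNat + (cols - 1 - c).toNat) (by omega)
    omega
  · rw [show (rows - 1 - (r + 1)).toNat + (cols - 1 - c).toNat
        = ((rows - 1 - r).toNat + (cols - 1 - c).toNat) - 1 from by omega]
    have := h3 ((rows - 1 - r).toNat + (cols - 1 - c).toNat) (by omega)
    have hp := Nat.one_le_pow ((rows - 1 - r).toNat + (cols - 1 - c).toNat - 1) 3 (by omega)
    omega
  · rw [show (rows - 1 - r).toNat + (cols - 1 - (c + 1)).toNat
        = ((rows - 1 - r).toNat + (cols - 1 - c).toNat) - 1 from by omega]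
    have := h3 ((rows - 1 - r).toNat + (cols - 1 - c).toNat) (by omega)
    have hp := Nat.one_le_pow ((rows - 1 - r).toNat + (cols - 1 - c).toNat - 1) 3 (by omega)
    omega
  · have := Nat.one_le_pow ((rows - 1 - r).toNat + (cols - 1 - c).toNat) 3 (by omega)
    omega

-- with enough fuel, B's stack loop flattens A's per-node traces, in stack order
lemma pvAltLoop_eq (matrix : List (List Int)) :
    ∀ fuel : Nat, ∀ stack : List (Int × Int),
      (stack.map (pvAltWeight (pvShape matrix).1 (pvShape matrix).2)).sum ≤ fuel →
      pvAltLoop matrix (pvShape matrix).1 (pvShape matrix).2 fuel stack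
        = (stack.map (fun n => traverse n matrix)).flatten := by
  intro fuel
  induction fuel with
  | zero =>
    intro stack h
    cases stack with
    | nil => simp [pvAltLoop]
    | cons p rest =>
      exfalso
      have h1 : 1 ≤ pvAltWeight (pvShape matrix).1 (pvShape matrix).2 p :=
        Nat.one_le_pow _ _ (by omega)
      simp [List.map_cons, List.sum_cons] at h
      omega
  | succ fuel ih =>
    intro stack h
    match stack with
    | [] => simp [pvAltLoop]
    | (r, c) :: rest =>
      rw [pvAltLoop]
      have hlt := pvAltWeight_lt (pvShape matrix).1 (pvShape matrix).2 r c rest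
      simp only [List.map_cons, List.sum_cons] at h hlt
      rw [ih _ (by omega)]
      rw [List.map_cons, List.flatten_cons]
      unfold _root_.traverse
      rw [pvTravGo]
      simp only [pvGetLeftNode, pvGetRightNode, List.map_append, List.flatten_append]
      have ed : r < (pvShape matrix).1 - 1 →
          pvTravGo matrix (pvDepth matrix (r, c)) (r + 1, c)
            = pvTravGo matrix (pvDepth matrix (r + 1, c) + 1) (r + 1, c) :=
        fun hd => pvTravGo_fuel matrix _ _ _ (by unfold pvDepth; omega) (Nat.lt_succ_self _)
      have ec : c < (pvShape matrix).2 - 1 →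
          pvTravGo matrix (pvDepth matrix (r, c)) (r, c + 1)
            = pvTravGo matrix (pvDepth matrix (r, c + 1) + 1) (r, c + 1) :=
        fun hc => pvTravGo_fuel matrix _ _ _ (by unfold pvDepth; omega) (Nat.lt_succ_self _)
      split_ifs with hd hc <;> simp_all

-- ===== VERDICT (by name: the statement is the Claim_ definition above) =====
theorem traverse_spec : Claim_equal_traverse := by
  intro node matrix _ _
  unfold Spec_traverse traverse_alt
  have h := pvAltLoop_eq matrix (pvAltWeight (pvShape matrix).1 (pvShape matrix).2 node) [node]
  simp only [List.map_cons, List.map_nil, List.sum_cons, List.sum_nil, Nat.add_zero] at h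
  have h' := h (Nat.le_refl _)
  simp only [pvShape] at h'
  simp [h']
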